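-- pv_equiv track=rewrite | github.com/mangalagb/Leetcode | microsoft/problem1.py | solution
-- ===== SOURCE A (Python) =====
-- def solution(Y, A, B, W):
--     # write your code in Python 3.6
--     is_leap_year = False
--     if Y % 4 == 0:
--         is_leap_year = True
--
--     start_month = get_months(A)
--     end_month = get_months(B)
--
--     total_days = 0
--     for i in range(start_month, end_month+1):
--         total_days += get_days(i, is_leap_year)
--
--     weeks = total_days // 8
--     return weeks
--
-- def get_months(month):
--     if month == "January":
--         return 1
--     elif month == "February":
--         return 2
--     elif month == "March":
--         return 3
--     elif month == "April":
--         return 4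
--     elif month == "May":
--         return 5
--     elif month == "June":
--         return 6
--     elif month == "July":
--         return 7
--     elif month == "August":
--         return 8
--     elif month == "September":
--         return 9
--     elif month == "October":
--         return 10
--     elif month == "November":
--         return 11
--     elif month == "December":
--         return 12
--
-- def get_days(month, is_leap_year):
--     #31, 28 (or 29 in a leap year), 31,  30, 31, 30, 31, 31, 30, 31, 30, 31
--     if month == 1:
--         return 31
--     elif month == 2:
--         if is_leap_year:
--             return 29
--         else:
--             return 28
--     elif month == 3:
--         return 31
--     elif month == 4:
--         return 30
--     elif month == 5:
--         return 31
--     elif month == 6: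
--         return 30
--     elif month == 7:
--         return 31
--     elif month == 8:
--         return 31
--     elif month == 9:
--         return 30
--     elif month == 10:
--         return 31
--     elif month == 11:
--         return 30
--     elif month == 12:
--         return 31
-- ===== SOURCE B (Python) =====
-- _MONTHS = {"January": 1, "February": 2, "March": 3, "April": 4, "May": 5,
--            "June": 6, "July": 7, "August": 8, "September": 9, "October": 10,
--            "November": 11, "December": 12}
--
-- # cumulative days in a non-leap year: _CUM[m] = days in months 1..m
-- _CUM = [0, 31, 59, 90, 120, 151, 181, 212, 243, 273, 304, 334, 365]
--
-- def solution(Y, A, B, W):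
--     start = _MONTHS[A]
--     end = _MONTHS[B]
--     if start > end:
--         return 0
--     total = _CUM[end] - _CUM[start - 1]
--     if Y % 4 == 0 and start <= 2 <= end:
--         total += 1
--     return total // 8
-- ===== Notes on version B (the rewrite author's own statement) =====
-- stated objective: simpler
-- what changed: Replaces the per-month loop and day if-chains with a precomputed cumulative-days prefix table (total = cum[end]-cum[start-1], plus 1 when the leap February lies in range) and a name->number dict, so no loop remains.
import Mathlib
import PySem

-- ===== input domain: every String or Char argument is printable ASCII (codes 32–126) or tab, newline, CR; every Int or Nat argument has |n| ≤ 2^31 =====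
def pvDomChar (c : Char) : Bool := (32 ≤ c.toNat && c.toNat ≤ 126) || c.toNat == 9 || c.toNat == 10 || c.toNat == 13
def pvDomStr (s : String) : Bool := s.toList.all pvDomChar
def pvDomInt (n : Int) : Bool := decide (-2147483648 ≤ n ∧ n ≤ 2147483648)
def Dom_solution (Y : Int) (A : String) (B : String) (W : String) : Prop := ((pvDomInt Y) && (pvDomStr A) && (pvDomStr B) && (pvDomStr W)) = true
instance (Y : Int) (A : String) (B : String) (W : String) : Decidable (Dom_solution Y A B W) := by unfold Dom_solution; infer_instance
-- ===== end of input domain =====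

-- B replaces the month loop by a cumulative-days prefix table; objective: simpler (O(1) lookup vs loop).
-- ===== PORT A =====
-- get_months: returns none where Python returns None (then A raises TypeError in range(); excluded by Pre_)
def get_months (month : String) : Option Int :=
  if month == "January" then some 1
  else if month == "February" then some 2
  else if month == "March" then some 3
  else if month == "April" then some 4
  else if month == "May" then some 5
  else if month == "June" then some 6
  else if month == "July" then some 7
  else if month == "August" then some 8
  else if month == "September" then some 9
  else if month == "October" then some 10
  else if month == "November" then some 11
  else if month == "December" then some 12
  else none

-- get_days: Python returns None for months outside 1..12 (unreachable under Pre_); 0 stands in for that dead branch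
def get_days (month : Int) (isLeap : Bool) : Int :=
  if month == 1 then 31
  else if month == 2 then (if isLeap then 29 else 28)
  else if month == 3 then 31
  else if month == 4 then 30
  else if month == 5 then 31
  else if month == 6 then 30
  else if month == 7 then 31
  else if month == 8 then 31
  else if month == 9 then 30
  else if month == 10 then 31
  else if month == 11 then 30
  else if month == 12 then 31
  else 0

def solution (Y : Int) (A : String) (B : String) (W : String) : Int :=
  let isLeap : Bool := Y % 4 == 0
  match get_months A, get_months B with
  | some s, some e =>
      let total := (PySem.List.pyRange s (e + 1) 1).foldl (fun acc i => acc + get_days i isLeap) 0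
      PySem.Int.floordiv total 8
  | _, _ => 0   -- unreachable under Pre_: Python raises TypeError here

-- ===== PORT B =====
def monthsDict : PySem.Dict String Int :=
  PySem.Dict.ofList [("January", 1), ("February", 2), ("March", 3), ("April", 4),
    ("May", 5), ("June", 6), ("July", 7), ("August", 8), ("September", 9),
    ("October", 10), ("November", 11), ("December", 12)]

def cumDays : List Int := [0, 31, 59, 90, 120, 151, 181, 212, 243, 273, 304, 334, 365]

def solution_alt (Y : Int) (A : String) (B : String) (W : String) : Int :=
  match PySem.Dict.get? monthsDict A with
  | none => 0   -- unreachable under Pre_: Python raises KeyError here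
  | some s =>
    match PySem.Dict.get? monthsDict B with
    | none => 0   -- unreachable under Pre_: Python raises KeyError here
    | some e =>
      if s > e then 0
      else
        match PySem.List.pyGet? cumDays e with
        | none => 0   -- unreachable: e ∈ 1..12
        | some ce =>
          match PySem.List.pyGet? cumDays (s - 1) with
          | none => 0   -- unreachable: s ∈ 1..12
          | some cs =>
            let total := ce - cs
            let total := if Y % 4 == 0 && (s ≤ 2 && 2 ≤ e) then total + 1 else total
            PySem.Int.floordiv total 8

-- ===== PRECONDITION & SPEC =====
def monthNames : List String :=
  ["January", "February", "March", "April", "May", "June", "July", "August",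
   "September", "October", "November", "December"]

-- Pre_ excludes exactly the inputs where Python A raises TypeError (invalid month name → get_months returns None)
def Pre_solution (Y : Int) (A : String) (B : String) (W : String) : Prop :=
  A ∈ monthNames ∧ B ∈ monthNames
instance (Y : Int) (A : String) (B : String) (W : String) : Decidable (Pre_solution Y A B W) := by unfold Pre_solution; infer_instance

def pvWitness_solution : Int × String × String × String := (2000, "January", "March", "x")

def Spec_solution (Y : Int) (A : String) (B : String) (W : String) (out : Int) : Prop := out = solution_alt Y A B W
instance (Y : Int) (A : String) (B : String) (W : String) (out : Int) : Decidable (Spec_solution Y A B W out) := by unfold Spec_solution; infer_instance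

-- ===== CLAIM (what is proved, stated in full; the proofs are below) =====
def Claim_equal_solution : Prop := ∀ (Y : Int) (A : String) (B : String) (W : String), Dom_solution Y A B W → Pre_solution Y A B W → Spec_solution Y A B W (solution Y A B W)

-- ===== LEMMAS AND PROOFS =====
-- proof-side cores: each port as a function of the month names and the leap Bool only
def coreA (a b : String) (leap : Bool) : Int :=
  match get_months a, get_months b with
  | some s, some e =>
      let total := (PySem.List.pyRange s (e + 1) 1).foldl (fun acc i => acc + get_days i leap) 0
      PySem.Int.floordiv total 8
  | _, _ => 0

def coreB (a b : String) (leap : Bool) : Int :=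
  match PySem.Dict.get? monthsDict a with
  | none => 0
  | some s =>
    match PySem.Dict.get? monthsDict b with
    | none => 0
    | some e =>
      if s > e then 0
      else
        match PySem.List.pyGet? cumDays e with
        | none => 0
        | some ce =>
          match PySem.List.pyGet? cumDays (s - 1) with
          | none => 0
          | some cs =>
            let total := ce - cs
            let total := if leap && (s ≤ 2 && 2 ≤ e) then total + 1 else total
            PySem.Int.floordiv total 8

lemma solution_eq_coreA (Y : Int) (A B W : String) :
    solution Y A B W = coreA A B (Y % 4 == 0) := rfl

lemma solution_alt_eq_coreB (Y : Int) (A B W : String) :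
    solution_alt Y A B W = coreB A B (Y % 4 == 0) := rfl

lemma core_agree : ∀ a ∈ monthNames, ∀ b ∈ monthNames, ∀ leap : Bool,
    coreA a b leap = coreB a b leap := by decide

-- ===== VERDICT (by name: the statement is the Claim_ definition above) =====
theorem solution_spec : Claim_equal_solution := by
  intro Y A B W _ hpre
  unfold Spec_solution
  rw [solution_eq_coreA, solution_alt_eq_coreB]
  exact core_agree A hpre.1 B hpre.2 (Y % 4 == 0)
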